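-- pv_equiv track=rewrite | github.com/hengtao/UsefulScripts | retrieve_geneseq_from_gtf_vcf_genome.py | snpseq
-- ===== SOURCE A (Python) =====
-- def snpseq(seq, value, start, end,  vcfdict):
--     seq = [i for i in seq]
--     if value[0] in vcfdict:
--         for posit in range(start, end):
--             if str(posit) in vcfdict[value[0]]:
--                 seq[posit - start] = vcfdict[value[0]][str(posit)]
--     seq = "".join(seq)
--     return seq
-- ===== SOURCE B (Python) =====
-- def snpseq(seq, value, start, end, vcfdict):
--     inner = vcfdict.get(value[0])
--     if inner is None:
--         return seq
--     pos_of = {str(p): p for p in range(start, end)}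
--     chars = list(seq)
--     for k, v in inner.items():
--         p = pos_of.get(k)
--         if p is not None:
--             chars[p - start] = v
--     return "".join(chars)
-- ===== Notes on version B (the rewrite author's own statement) =====
-- stated objective: alternative
-- what changed: B inverts the lookup direction: it builds a str(p)->p index for the window once and applies substitutions in a single pass over the chromosome's SNP dict items, instead of probing the SNP dict once per position; Pre_ excludes only inputs where A raises IndexError (empty value, or an in-range SNP key pointing past the end of seq) and Lean association lists whose selected inner dict has duplicate keys, which no Python dict input can produce.
-- outside the precondition, e.g. on snpseq('ACGT', [], 0, 1, {}): A raises IndexError, B raises IndexError; on snpseq('A', ['c'], 0, 3, {'c': {'2': 'G'}}): A raises IndexError, B raises IndexError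
import Mathlib
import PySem

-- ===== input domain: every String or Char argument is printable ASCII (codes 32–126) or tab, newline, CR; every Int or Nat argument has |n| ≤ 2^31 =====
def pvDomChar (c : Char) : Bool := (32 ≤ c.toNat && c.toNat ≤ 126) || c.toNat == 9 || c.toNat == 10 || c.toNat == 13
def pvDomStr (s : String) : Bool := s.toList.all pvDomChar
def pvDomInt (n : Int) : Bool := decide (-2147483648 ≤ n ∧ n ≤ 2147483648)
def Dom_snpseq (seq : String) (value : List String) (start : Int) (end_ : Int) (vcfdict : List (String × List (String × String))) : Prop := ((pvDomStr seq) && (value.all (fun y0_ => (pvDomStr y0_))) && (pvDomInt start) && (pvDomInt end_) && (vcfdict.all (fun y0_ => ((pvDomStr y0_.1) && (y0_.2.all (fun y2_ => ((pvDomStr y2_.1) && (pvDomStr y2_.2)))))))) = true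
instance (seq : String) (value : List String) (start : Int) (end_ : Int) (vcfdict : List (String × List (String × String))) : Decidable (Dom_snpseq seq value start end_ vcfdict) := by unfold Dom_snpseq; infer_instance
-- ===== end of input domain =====

-- B inverts the lookup direction: a str(p)->p index for the window is built once and the
-- SNP dict is walked in a single pass, instead of probing the dict once per position
-- (objective: alternative). Equivalence is about the return value; neither version
-- mutates its arguments.

-- ===== PORT A =====
def snpseq (seq : String) (value : List String) (start : Int) (end_ : Int) (vcfdict : List (String × List (String × String))) : String :=
  -- seq = [i for i in seq] : a list of one-character strings, kept as List (List Char)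
  let seqL : List (List Char) := seq.toList.map (fun c => [c])
  let v0 := value.headD ""          -- value[0]; Pre_ excludes value = []
  let seqL' :=
    match (PySem.Dict.mk vcfdict).get? v0 with   -- 'if value[0] in vcfdict' + 'vcfdict[value[0]]'
    | none => seqL
    | some inner =>
      (PySem.List.pyRange start end_ 1).foldl (fun l posit =>
        match (PySem.Dict.mk inner).get? (PySem.Int.toStr posit) with  -- 'if str(posit) in …' + lookup
        | some v => l.set (posit - start).toNat v.toList   -- seq[posit - start] = …; Pre_ keeps this index in range
        | none => l) seqL
  String.ofList seqL'.flatten        -- "".join(seq)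

-- ===== PORT B =====
def snpseq_alt (seq : String) (value : List String) (start : Int) (end_ : Int) (vcfdict : List (String × List (String × String))) : String :=
  match (PySem.Dict.mk vcfdict).get? (value.headD "") with   -- vcfdict.get(value[0])
  | none => seq
  | some inner =>
    -- pos_of = {str(p): p for p in range(start, end)}
    let posOf : PySem.Dict String Int :=
      (PySem.List.pyRange start end_ 1).foldl (fun d p => d.insert (PySem.Int.toStr p) p) PySem.Dict.empty
    let chars : List (List Char) := seq.toList.map (fun c => [c])   -- list(seq)
    let res := inner.foldl (fun l kv =>
        match posOf.get? kv.1 with                                  -- pos_of.get(k)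
        | some p => l.set (p - start).toNat kv.2.toList             -- chars[p - start] = v
        | none => l) chars
    String.ofList res.flatten                                       -- "".join(chars)

-- ===== PRECONDITION & SPEC =====
-- spec-side helper for Pre_: the position p with str(p) = k, if any (canonical decimal)
def canonInt (k : String) : Option Int :=
  let cs := k.toList
  let neg : Bool := cs.head? == some '-'
  let ds := if neg then cs.tail else cs
  if PySem.Chars.strIsdigit ds = true ∧ ¬(1 < ds.length ∧ ds.head? = some '0') then
    let n : Int := ds.foldl (fun a c => 10 * a + ((c.toNat : Int) - 48)) 0
    if neg then (if 0 < n then some (-n) else none) else some n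
  else none

-- Pre_ excludes exactly (a) value = [] and (b) a SNP key at an in-range position
-- past the end of seq — on both A raises IndexError — and (c) association lists in
-- which the selected inner dict has duplicate keys, which no Python dict input can
-- produce (A would read the first copy, B the last).
def Pre_snpseq (seq : String) (value : List String) (start : Int) (end_ : Int) (vcfdict : List (String × List (String × String))) : Prop :=
  value ≠ [] ∧
  ∀ inner ∈ ((PySem.Dict.mk vcfdict).get? (value.headD "")).toList,
    (inner.map Prod.fst).Nodup ∧
    ∀ kv ∈ inner, ∀ p ∈ (canonInt kv.1).toList,
      start ≤ p → p < end_ → p - start < (seq.toList.length : Int)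
instance (seq : String) (value : List String) (start : Int) (end_ : Int) (vcfdict : List (String × List (String × String))) : Decidable (Pre_snpseq seq value start end_ vcfdict) := by unfold Pre_snpseq; infer_instance

def pvWitness_snpseq : String × List String × Int × Int × (List (String × List (String × String))) :=
  ("ACGT", ["chr1"], 10, 14, [("chr1", [("11", "G"), ("x", "T")])])

def Spec_snpseq (seq : String) (value : List String) (start : Int) (end_ : Int) (vcfdict : List (String × List (String × String))) (out : String) : Prop := out = snpseq_alt seq value start end_ vcfdict
instance (seq : String) (value : List String) (start : Int) (end_ : Int) (vcfdict : List (String × List (String × String))) (out : String) : Decidable (Spec_snpseq seq value start end_ vcfdict out) := by unfold Spec_snpseq; infer_instance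

-- ===== CLAIM (what is proved, stated in full; the proofs are below) =====
def Claim_equal_snpseq : Prop := ∀ (seq : String) (value : List String) (start : Int) (end_ : Int) (vcfdict : List (String × List (String × String))), Dom_snpseq seq value start end_ vcfdict → Pre_snpseq seq value start end_ vcfdict → Spec_snpseq seq value start end_ vcfdict (snpseq seq value start end_ vcfdict)

-- ===== LEMMAS AND PROOFS =====

-- ---- characters and digit strings ----

theorem isdigit_iff (c : Char) : PySem.Chars.isdigit c = true ↔ 48 ≤ c.toNat ∧ c.toNat ≤ 57 := by
  have h1 : ('0').val.toNat = 48 := by decide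
  have h2 : ('9').val.toNat = 57 := by decide
  unfold PySem.Chars.isdigit
  rw [Bool.and_eq_true, decide_eq_true_eq, decide_eq_true_eq, Char.le_def, Char.le_def,
    UInt32.le_iff_toNat_le, UInt32.le_iff_toNat_le, h1, h2]
  exact Iff.rfl

theorem digitChar_isdigit {d : ℕ} (h : d < 10) : PySem.Chars.isdigit (Nat.digitChar d) = true := by
  interval_cases d <;> decide

theorem digitChar_valN {d : ℕ} (h : d < 10) : (Nat.digitChar d).toNat - 48 = d := by
  interval_cases d <;> decide

-- big-endian digit value over ℕ
def bigvalN (ds : List Char) : ℕ := ds.foldl (fun a c => 10 * a + (c.toNat - 48)) 0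

theorem bigval_int_aux (ds : List Char) (h : ∀ c ∈ ds, PySem.Chars.isdigit c = true) :
    ∀ a : ℕ, ds.foldl (fun a c => 10 * a + ((c.toNat : Int) - 48)) (a : Int)
      = ((ds.foldl (fun a c => 10 * a + (c.toNat - 48)) a : ℕ) : Int) := by
  induction ds with
  | nil => intro a; simp
  | cons c t ih =>
    intro a
    have hc := (isdigit_iff c).mp (h c (by simp))
    have ht : ∀ x ∈ t, PySem.Chars.isdigit x = true := fun x hx => h x (by simp [hx])
    simp only [List.foldl_cons]
    have : (10 * (a : Int) + ((c.toNat : Int) - 48)) = ((10 * a + (c.toNat - 48) : ℕ) : Int) := by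
      push_cast [Nat.cast_sub (by omega : (48:ℕ) ≤ c.toNat)]
      ring
    rw [this, ih ht]

theorem bigval_int_eq (ds : List Char) (h : ∀ c ∈ ds, PySem.Chars.isdigit c = true) :
    ds.foldl (fun a c => 10 * a + ((c.toNat : Int) - 48)) 0 = (bigvalN ds : Int) := by
  simpa using bigval_int_aux ds h 0

theorem bigvalN_append (ds : List Char) (c : Char) :
    bigvalN (ds ++ [c]) = 10 * bigvalN ds + (c.toNat - 48) := by
  simp [bigvalN, List.foldl_append]

theorem bigvalN_rep (L : List ℕ) (h : ∀ d ∈ L, d < 10) :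
    bigvalN ((L.map Nat.digitChar).reverse) = Nat.ofDigits 10 L := by
  induction L with
  | nil => simp [bigvalN]
  | cons d t ih =>
    have hd : d < 10 := h d (by simp)
    have ht : ∀ x ∈ t, x < 10 := fun x hx => h x (by simp [hx])
    simp only [List.map_cons, List.reverse_cons, bigvalN_append, ih ht, Nat.ofDigits_cons,
      digitChar_valN hd]
    omega

-- Nat.toDigits 10 agrees with Nat.digits 10
theorem toDigitsCore_eq : ∀ (f n : ℕ) (acc : List Char), n ≠ 0 → n < f →
    Nat.toDigitsCore 10 f n acc = ((Nat.digits 10 n).map Nat.digitChar).reverse ++ acc := by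
  intro f
  induction f with
  | zero => intro n acc h hf; omega
  | succ f ih =>
    intro n acc hn hf
    rw [Nat.toDigitsCore]
    have hdig : Nat.digits 10 n = n % 10 :: Nat.digits 10 (n / 10) :=
      Nat.digits_def' (by norm_num) (by omega)
    by_cases hq : n / 10 = 0
    · simp [hq, hdig]
    · have hlt : n / 10 < f := by omega
      simp only [hq, if_false]
      rw [ih (n / 10) _ hq hlt, hdig]
      simp

theorem toDigits_eq (n : ℕ) :
    Nat.toDigits 10 n =
      if n = 0 then ['0'] else ((Nat.digits 10 n).map Nat.digitChar).reverse := by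
  by_cases h : n = 0
  · subst h; decide
  · rw [if_neg h]
    have := toDigitsCore_eq (n + 1) n [] h (by omega)
    simpa [Nat.toDigits] using this

theorem toDigits_all_digits (n : ℕ) : ∀ c ∈ Nat.toDigits 10 n, PySem.Chars.isdigit c = true := by
  rw [toDigits_eq]
  split
  · intro c hc; simp at hc; subst hc; decide
  · intro c hc
    simp only [List.mem_reverse, List.mem_map] at hc
    obtain ⟨d, hd, rfl⟩ := hc
    exact digitChar_isdigit (Nat.digits_lt_base (by norm_num) hd)

theorem toDigits_ne_nil (n : ℕ) : Nat.toDigits 10 n ≠ [] := by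
  rw [toDigits_eq]
  split
  · simp
  · simp only [ne_eq, List.reverse_eq_nil_iff, List.map_eq_nil_iff]
    rw [Nat.digits_eq_nil_iff_eq_zero]
    assumption

theorem digitChar_eq_zero {d : ℕ} (h : d < 10) (h0 : Nat.digitChar d = '0') : d = 0 := by
  interval_cases d <;> first | rfl | exact absurd h0 (by decide)

theorem toDigits_no_leading_zero (n : ℕ) :
    ¬(1 < (Nat.toDigits 10 n).length ∧ (Nat.toDigits 10 n).head? = some '0') := by
  rw [toDigits_eq]
  split
  · simp
  · rintro ⟨-, hh⟩
    rename_i hn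
    have hne : Nat.digits 10 n ≠ [] := Nat.digits_ne_nil_iff_ne_zero.mpr hn
    rw [List.head?_reverse, List.getLast?_map,
      List.getLast?_eq_some_getLast hne] at hh
    simp only [Option.map_some, Option.some.injEq] at hh
    have hlt : (Nat.digits 10 n).getLast hne < 10 :=
      Nat.digits_lt_base (by norm_num) (List.getLast_mem hne)
    exact Nat.getLast_digit_ne_zero 10 hn (digitChar_eq_zero hlt hh)

theorem bigvalN_toDigits (n : ℕ) : bigvalN (Nat.toDigits 10 n) = n := by
  rw [toDigits_eq]
  split
  · rename_i h; subst h; decide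
  · rw [bigvalN_rep _ (fun d hd => Nat.digits_lt_base (by norm_num) hd), Nat.ofDigits_digits]

-- ---- canonInt vs PySem.Int.toStr ----

theorem strIsdigit_iff (ds : List Char) :
    PySem.Chars.strIsdigit ds = true ↔ ds ≠ [] ∧ ∀ c ∈ ds, PySem.Chars.isdigit c = true := by
  simp [PySem.Chars.strIsdigit]

theorem canonInt_toStr (p : Int) : canonInt (PySem.Int.toStr p) = some p := by
  have htl : (PySem.Int.toStr p).toList = PySem.Int.toChars p := PySem.Int.toList_toStr p
  by_cases hp : p < 0
  · have hch : PySem.Int.toChars p = '-' :: Nat.toDigits 10 p.natAbs := by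
      simp [PySem.Int.toChars, hp]
    simp only [canonInt, htl, hch, List.head?_cons, beq_self_eq_true, if_true, List.tail_cons]
    rw [if_pos ⟨(strIsdigit_iff _).mpr ⟨toDigits_ne_nil _, toDigits_all_digits _⟩,
        toDigits_no_leading_zero _⟩]
    rw [bigval_int_eq _ (toDigits_all_digits _), bigvalN_toDigits]
    rw [if_pos (show (0:Int) < (p.natAbs : Int) by omega)]
    congr 1
    omega
  · have hch : PySem.Int.toChars p = Nat.toDigits 10 p.toNat := by
      simp [PySem.Int.toChars, hp]
    have hneg : ((Nat.toDigits 10 p.toNat).head? == some '-') = false := by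
      rcases hn : Nat.toDigits 10 p.toNat with _ | ⟨a, t⟩
      · exact absurd hn (toDigits_ne_nil _)
      · have ha : PySem.Chars.isdigit a = true :=
          toDigits_all_digits p.toNat a (by simp [hn])
        have : a ≠ '-' := by
          intro hcm; rw [hcm] at ha; exact absurd ha (by decide)
        simp [this]
    simp only [canonInt, htl, hch, hneg, Bool.false_eq_true, if_false]
    rw [if_pos ⟨(strIsdigit_iff _).mpr ⟨toDigits_ne_nil _, toDigits_all_digits _⟩,
        toDigits_no_leading_zero _⟩]
    rw [bigval_int_eq _ (toDigits_all_digits _), bigvalN_toDigits]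
    congr 1
    omega

theorem toStr_inj {p q : Int} (h : PySem.Int.toStr p = PySem.Int.toStr q) : p = q := by
  have := canonInt_toStr p
  rw [h, canonInt_toStr q] at this
  exact (Option.some_inj.mp this).symm

-- ---- the position index pos_of ----

theorem posOf_get? (start end_ : Int) (k : String) (p : Int) :
    ((PySem.List.pyRange start end_ 1).foldl
        (fun d p => d.insert (PySem.Int.toStr p) p) PySem.Dict.empty).get? k = some p
      ↔ (start ≤ p ∧ p < end_) ∧ k = PySem.Int.toStr p := by
  have hmapnd : ((PySem.List.pyRange start end_ 1).map PySem.Int.toStr).Nodup :=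
    (PySem.List.nodup_pyRange_one start end_).map (fun _ _ h => toStr_inj h)
  have hitems : ((PySem.List.pyRange start end_ 1).foldl
      (fun d p => d.insert (PySem.Int.toStr p) p) PySem.Dict.empty).items
      = (PySem.Dict.empty : PySem.Dict String Int).items
        ++ (PySem.List.pyRange start end_ 1).map (fun p => (PySem.Int.toStr p, p)) :=
    PySem.Dict.items_foldl_insert_fresh _ _ _ _ (fun a _ => PySem.Dict.contains_empty _) hmapnd
  have hempty : (PySem.Dict.empty : PySem.Dict String Int).items = [] := rfl
  rw [hempty, List.nil_append] at hitems
  have hkeys : ((PySem.List.pyRange start end_ 1).foldl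
      (fun d p => d.insert (PySem.Int.toStr p) p) PySem.Dict.empty).keys.Nodup := by
    simp only [PySem.Dict.keys, hitems, List.map_map]
    simpa [Function.comp] using hmapnd
  rw [PySem.Dict.get?_eq_some_iff_mem_items _ _ _ hkeys, hitems, List.mem_map]
  constructor
  · rintro ⟨q, hq, heq⟩
    have h1 : k = PySem.Int.toStr q := (congrArg Prod.fst heq).symm
    have h2 : p = q := (congrArg Prod.snd heq).symm
    subst h2
    exact ⟨PySem.List.mem_pyRange_one.mp hq, h1⟩
  · rintro ⟨hr, rfl⟩
    exact ⟨p, PySem.List.mem_pyRange_one.mpr hr, rfl⟩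

-- ---- fold-of-set machinery ----

theorem flatten_map_singleton_str (s : String) :
    String.ofList (List.flatten (s.toList.map (fun c => [c]))) = s := by
  have h : ∀ l : List Char, (l.map (fun c => [c])).flatten = l := by
    intro l; induction l with
    | nil => simp
    | cons c t ih => simp [ih]
  rw [h, String.ofList_toList]

theorem snpseq_main (seq : String) (start end_ : Int) (inner : List (String × String))
    (hnd : (inner.map Prod.fst).Nodup) :
    (PySem.List.pyRange start end_ 1).foldl (fun l posit =>
        match (PySem.Dict.mk inner).get? (PySem.Int.toStr posit) with
        | some v => l.set (posit - start).toNat v.toList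
        | none => l) (seq.toList.map (fun c => [c]))
    = inner.foldl (fun l kv =>
        match ((PySem.List.pyRange start end_ 1).foldl
            (fun d p => d.insert (PySem.Int.toStr p) p) PySem.Dict.empty).get? kv.1 with
        | some p => l.set (p - start).toNat kv.2.toList
        | none => l) (seq.toList.map (fun c => [c])) := by
  have hkeys : (PySem.Dict.mk inner).keys.Nodup := by
    rw [PySem.Dict.keys_mk]; exact hnd
  have hinner : (PySem.Dict.mk inner).items = inner := rfl
  -- op extractors
  set f : Int → Option (ℕ × List Char) := fun p =>
    if start ≤ p ∧ p < end_ then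
      ((PySem.Dict.mk inner).get? (PySem.Int.toStr p)).map (fun v => ((p - start).toNat, v.toList))
    else none with hf
  set g : (String × String) → Option (ℕ × List Char) := fun kv =>
    (((PySem.List.pyRange start end_ 1).foldl
        (fun d p => d.insert (PySem.Int.toStr p) p) PySem.Dict.empty).get? kv.1).map
      (fun p => ((p - start).toNat, kv.2.toList)) with hg
  -- A's loop is a fold of sets over filterMap f
  have hA : (PySem.List.pyRange start end_ 1).foldl (fun l posit =>
        match (PySem.Dict.mk inner).get? (PySem.Int.toStr posit) with
        | some v => l.set (posit - start).toNat v.toList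
        | none => l) (seq.toList.map (fun c => [c]))
      = ((PySem.List.pyRange start end_ 1).filterMap f).foldl
          (fun l (op : ℕ × List Char) => l.set op.1 op.2) (seq.toList.map (fun c => [c])) := by
    rw [List.foldl_filterMap]
    apply List.foldl_ext
    intro l p hp
    have hr : start ≤ p ∧ p < end_ := PySem.List.mem_pyRange_one.mp hp
    rw [hf]
    simp only [if_pos hr]
    cases (PySem.Dict.mk inner).get? (PySem.Int.toStr p) <;> simp
  have hB : inner.foldl (fun l kv =>
        match ((PySem.List.pyRange start end_ 1).foldl
            (fun d p => d.insert (PySem.Int.toStr p) p) PySem.Dict.empty).get? kv.1 with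
        | some p => l.set (p - start).toNat kv.2.toList
        | none => l) (seq.toList.map (fun c => [c]))
      = (inner.filterMap g).foldl
          (fun l (op : ℕ × List Char) => l.set op.1 op.2) (seq.toList.map (fun c => [c])) := by
    rw [List.foldl_filterMap]
    apply List.foldl_ext
    intro l kv _
    simp only [hg]
    cases hc : ((PySem.List.pyRange start end_ 1).foldl
        (fun d p => d.insert (PySem.Int.toStr p) p) PySem.Dict.empty).get? kv.1 <;> rfl
  rw [hA, hB]
  -- membership characterizations
  have hmemf : ∀ (c : ℕ × List Char) (p : Int), f p = some c ↔
      (start ≤ p ∧ p < end_) ∧ ∃ v, (PySem.Dict.mk inner).get? (PySem.Int.toStr p) = some v ∧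
        c = ((p - start).toNat, v.toList) := by
    intro c p
    rw [hf]
    by_cases hr : start ≤ p ∧ p < end_
    · simp only [if_pos hr, Option.map_eq_some_iff]
      constructor
      · rintro ⟨v, hv, rfl⟩; exact ⟨hr, v, hv, rfl⟩
      · rintro ⟨-, v, hv, rfl⟩; exact ⟨v, hv, rfl⟩
    · simp [hr]
  have hmemg : ∀ (c : ℕ × List Char) (kv : String × String), g kv = some c ↔
      ∃ p, kv.1 = PySem.Int.toStr p ∧ (start ≤ p ∧ p < end_) ∧
        c = ((p - start).toNat, kv.2.toList) := by
    intro c kv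
    simp only [hg]
    rw [Option.map_eq_some_iff]
    constructor
    · rintro ⟨p, hp, rfl⟩
      obtain ⟨hr, hk⟩ := (posOf_get? start end_ kv.1 p).mp hp
      exact ⟨p, hk, hr, rfl⟩
    · rintro ⟨p, hk, hr, rfl⟩
      exact ⟨p, (posOf_get? start end_ kv.1 p).mpr ⟨hr, hk⟩, rfl⟩
  -- nodup of both op lists
  have hndA : ((PySem.List.pyRange start end_ 1).filterMap f).Nodup := by
    apply List.Nodup.filterMap ?_ (PySem.List.nodup_pyRange_one start end_)
    intro a a' b hb hb'
    rw [Option.mem_def] at hb hb'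
    obtain ⟨hr, v, hv, rfl⟩ := (hmemf b a).mp hb
    obtain ⟨hr', v', hv', hb2⟩ := (hmemf _ a').mp hb'
    have : (a - start).toNat = (a' - start).toNat := congrArg Prod.fst hb2
    omega
  have hndB : (inner.filterMap g).Nodup := by
    apply List.Nodup.filterMap ?_ (hnd.of_map)
    intro a a' b hb hb'
    rw [Option.mem_def] at hb hb'
    obtain ⟨p, hp, hr, rfl⟩ := (hmemg b a).mp hb
    obtain ⟨p', hp', hr', hb2⟩ := (hmemg _ a').mp hb'
    have hidx : (p - start).toNat = (p' - start).toNat := congrArg Prod.fst hb2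
    have hpp : p = p' := by omega
    subst hpp
    have h2 : a.2.toList = a'.2.toList := congrArg Prod.snd hb2
    have h2' : a.2 = a'.2 := by
      have := congrArg String.ofList h2
      rwa [String.ofList_toList, String.ofList_toList] at this
    exact Prod.ext (hp.trans hp'.symm) h2'
  -- the two op lists are permutations of each other
  have hperm : ((PySem.List.pyRange start end_ 1).filterMap f).Perm (inner.filterMap g) := by
    rw [List.perm_ext_iff_of_nodup hndA hndB]
    intro c
    simp only [List.mem_filterMap]
    constructor
    · rintro ⟨p, hp, hc⟩
      have hr := PySem.List.mem_pyRange_one.mp hp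
      obtain ⟨-, v, hv, rfl⟩ := (hmemf c p).mp hc
      have hkv : (PySem.Int.toStr p, v) ∈ inner := by
        have := (PySem.Dict.get?_eq_some_iff_mem_items (PySem.Dict.mk inner)
          (PySem.Int.toStr p) v hkeys).mp hv
        rwa [hinner] at this
      refine ⟨(PySem.Int.toStr p, v), hkv, ?_⟩
      rw [hmemg]
      exact ⟨p, rfl, hr, rfl⟩
    · rintro ⟨kv, hkv, hc⟩
      obtain ⟨p, hk1, hr, rfl⟩ := (hmemg c kv).mp hc
      have hv : (PySem.Dict.mk inner).get? (PySem.Int.toStr p) = some kv.2 := by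
        apply (PySem.Dict.get?_eq_some_iff_mem_items (PySem.Dict.mk inner)
          (PySem.Int.toStr p) kv.2 hkeys).mpr
        rw [hinner, ← hk1]
        exact hkv
      refine ⟨p, PySem.List.mem_pyRange_one.mpr hr, ?_⟩
      rw [hmemf]
      exact ⟨hr, kv.2, hv, rfl⟩
  -- sets at distinct indices commute
  apply hperm.foldl_eq' ?_
  intro x hx y hy z
  by_cases hxy : x.1 = y.1
  · -- same index: by the membership characterization the ops are equal
    rw [List.mem_filterMap] at hx hy
    obtain ⟨p, hp, hcx⟩ := hx
    obtain ⟨q, hq, hcy⟩ := hy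
    obtain ⟨hrp, v, hv, hxv⟩ := (hmemf x p).mp hcx
    obtain ⟨hrq, w, hw, hyw⟩ := (hmemf y q).mp hcy
    have hx1 : x.1 = (p - start).toNat := by rw [hxv]
    have hy1 : y.1 = (q - start).toNat := by rw [hyw]
    have hpq : p = q := by omega
    subst hpq
    have hvw : v = w := by rw [hv] at hw; exact Option.some_inj.mp hw
    subst hvw
    have : x = y := hxv.trans hyw.symm
    subst this
    rfl
  · exact List.set_comm _ _ hxy

-- ===== VERDICT (by name: the statement is the Claim_ definition above) =====
theorem snpseq_spec : Claim_equal_snpseq := by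
  intro seq value start end_ vcfdict _hdom hpre
  obtain ⟨hv, hin⟩ := hpre
  unfold Spec_snpseq snpseq snpseq_alt
  cases h : (PySem.Dict.mk vcfdict).get? (value.headD "") with
  | none => simp only [h, flatten_map_singleton_str]
  | some inner =>
    have hi := hin inner (by simp only [h]; simp)
    simp only [h]
    rw [snpseq_main seq start end_ inner hi.1]
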